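-- pv_equiv track=rewrite | github.com/queelius/computational-explorations | tests/test_primitive_coprime.py | _all_primitive_coprime_max
-- ===== SOURCE A (Python) =====
-- import math
--
-- def _all_primitive_coprime_max(n):
--     """Find max coprime pairs over all primitive subsets of [n]."""
--     from itertools import combinations
--     best = 0
--     elements = list(range(1, n + 1))
--     for size in range(2, n + 1):
--         for combo in combinations(elements, size):
--             A = set(combo)
--             # Check primitivity
--             prim = True
--             combo_sorted = sorted(combo)
--             for i in range(len(combo_sorted)):
--                 for j in range(i + 1, len(combo_sorted)):
--                     if combo_sorted[j] % combo_sorted[i] == 0: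
--                         prim = False
--                         break
--                 if not prim:
--                     break
--             if prim:
--                 M = sum(1 for a, b in combinations(A, 2)
--                         if math.gcd(a, b) == 1)
--                 best = max(best, M)
--     return best
-- ===== SOURCE B (Python) =====
-- import math
--
-- def _all_primitive_coprime_max(n):
--     """Find max coprime pairs over all primitive subsets of [n]."""
--     best = 0
--
--     def dfs(chosen, count, cands):
--         # visit node: running coprime-pair count of `chosen`
--         nonlocal best
--         best = max(best, count)
--         while cands:
--             c, cands = cands[0], cands[1:]
--             if all(c % x != 0 and x % c != 0 for x in chosen):
--                 dfs(chosen + [c],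
--                     count + sum(1 for x in chosen if math.gcd(c, x) == 1),
--                     cands)
--
--     dfs([], 0, list(range(1, n + 1)))
--     return best
-- ===== Notes on version B (the rewrite author's own statement) =====
-- stated objective: alternative
-- what changed: Replaced the generate-all-combinations-then-filter scan with a recursive backtracking search over 1..n that prunes a branch as soon as a candidate divides or is divided by a chosen element (keeping the set primitive by construction) and maintains the coprime-pair count incrementally instead of recounting per subset.
import Mathlib
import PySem

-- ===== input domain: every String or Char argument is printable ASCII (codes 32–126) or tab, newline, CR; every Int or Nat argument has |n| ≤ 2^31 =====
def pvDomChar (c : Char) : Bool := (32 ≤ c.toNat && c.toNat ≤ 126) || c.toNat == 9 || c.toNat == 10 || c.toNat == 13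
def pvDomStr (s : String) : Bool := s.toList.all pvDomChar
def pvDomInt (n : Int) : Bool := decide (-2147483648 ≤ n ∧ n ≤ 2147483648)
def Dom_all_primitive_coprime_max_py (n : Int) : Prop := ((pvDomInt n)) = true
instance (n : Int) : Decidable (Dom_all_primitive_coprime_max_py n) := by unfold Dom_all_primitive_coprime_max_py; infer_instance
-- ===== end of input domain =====

-- B replaces A's enumerate-all-combinations-then-filter scan by a pruned backtracking
-- search with an incrementally maintained coprime-pair count; return values agree on every n.

-- ===== PORT A =====
-- itertools.combinations(l, k) (elements kept in list order)
def pvCombos : List Int → Nat → List (List Int)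
  | _, 0 => [[]]
  | [], _ + 1 => []
  | x :: xs, k + 1 => (pvCombos xs k).map (fun t => x :: t) ++ pvCombos xs (k + 1)

-- A's primitivity check: nested loops with early break = short-circuit all over later elements
def pvPrimCheck : List Int → Bool
  | [] => true
  | x :: rest => (rest.all fun y => !(PySem.Int.mod y x == 0)) && pvPrimCheck rest

-- sum(1 for a,b in combinations(A,2) if gcd(a,b)==1); set(combo) has exactly combo's
-- elements (combinations yields distinct elements) and the sum is order-independent
def pvCp : List Int → Int
  | [] => 0
  | x :: rest => ((rest.countP fun y => Int.gcd x y == 1 : Nat) : Int) + pvCp rest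

def all_primitive_coprime_max_py (n : Int) : Int :=
  (PySem.List.pyRange 2 (n + 1) 1).foldl
    (fun best size =>
      (pvCombos (PySem.List.pyRange 1 (n + 1) 1) size.toNat).foldl
        (fun best combo =>
          if pvPrimCheck (PySem.List.sorted combo (fun x => x) false) then
            max best (pvCp combo)
          else best)
        best)
    0

-- ===== PORT B =====
-- all(c % x != 0 and x % c != 0 for x in chosen)
def pvOK (chosen : List Int) (c : Int) : Bool :=
  chosen.all fun x => !(PySem.Int.mod c x == 0) && !(PySem.Int.mod x c == 0)

-- dfs(chosen, count, cands): best = max(best, count) is inlined at the call sites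
def pvDfs : List Int → List Int → Int → Int → Int
  | [], _, _, best => best
  | c :: cands, chosen, count, best =>
    if pvOK chosen c then
      let cnt := count + ((chosen.countP fun x => Int.gcd c x == 1 : Nat) : Int)
      pvDfs cands chosen count (pvDfs cands (chosen ++ [c]) cnt (max best cnt))
    else
      pvDfs cands chosen count best

def all_primitive_coprime_max_py_alt (n : Int) : Int :=
  pvDfs (PySem.List.pyRange 1 (n + 1) 1) [] 0 (max 0 0)

-- ===== PRECONDITION & SPEC =====
def Spec_all_primitive_coprime_max_py (n : Int) (out : Int) : Prop := out = all_primitive_coprime_max_py_alt n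
instance (n : Int) (out : Int) : Decidable (Spec_all_primitive_coprime_max_py n out) := by unfold Spec_all_primitive_coprime_max_py; infer_instance

-- ===== CLAIM (what is proved, stated in full; the proofs are below) =====
def Claim_equal_all_primitive_coprime_max_py : Prop := ∀ (n : Int), Dom_all_primitive_coprime_max_py n → Spec_all_primitive_coprime_max_py n (all_primitive_coprime_max_py n)

-- ===== LEMMAS AND PROOFS =====

-- the compatibility test applied along a whole extension S of `chosen`
def pvCompat : List Int → List Int → Bool
  | _, [] => true
  | chosen, c :: S => pvOK chosen c && pvCompat (chosen ++ [c]) S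

-- the total coprime-pair gain of appending S to `chosen` one element at a time
def pvG : List Int → List Int → Int
  | _, [] => 0
  | chosen, c :: S => ((chosen.countP fun x => Int.gcd c x == 1 : Nat) : Int) + pvG (chosen ++ [c]) S

-- generic max-fold bounds
theorem pv_le_foldl {α : Type} (step : Int → α → Int) (h : ∀ b a, b ≤ step b a) :
    ∀ (l : List α) (init : Int), init ≤ l.foldl step init := by
  intro l
  induction l with
  | nil => intro init; simp
  | cons a l ih => intro init; exact le_trans (h init a) (ih (step init a))

theorem pv_foldl_le {α : Type} (step : Int → α → Int) (m : Int) :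
    ∀ (l : List α), (∀ b a, b ≤ m → a ∈ l → step b a ≤ m) →
      ∀ init, init ≤ m → l.foldl step init ≤ m := by
  intro l
  induction l with
  | nil => intro _ init h; simpa using h
  | cons a l ih =>
      intro hstep init hinit
      exact ih (fun b a' hb ha' => hstep b a' hb (by simp [ha'])) (step init a)
        (hstep init a hinit (by simp))

theorem pv_val_le_foldl {α : Type} (step : Int → α → Int) (h : ∀ b a, b ≤ step b a)
    {l : List α} {a : α} (ha : a ∈ l) (v : Int) (hv : ∀ b, v ≤ step b a) :
    ∀ init, v ≤ l.foldl step init := by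
  induction l with
  | nil => cases ha
  | cons x l ih =>
      intro init
      rcases List.mem_cons.1 ha with rfl | ha'
      · exact le_trans (hv init) (pv_le_foldl step h l (step init a))
      · exact ih ha' (step init x)

-- B: the initial best is a lower bound of the search result
theorem pvDfs_ge_best : ∀ (cands chosen : List Int) (count best : Int),
    best ≤ pvDfs cands chosen count best := by
  intro cands
  induction cands with
  | nil => intro chosen count best; simp [pvDfs]
  | cons c cands ih =>
      intro chosen count best
      by_cases h : pvOK chosen c = true
      · simp only [pvDfs, h, if_true]
        exact le_trans (le_trans (le_max_left _ _) (ih _ _ _)) (ih _ _ _)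
      · simp only [pvDfs, h]
        exact ih _ _ _

-- B: upper bound — every value the search maximizes comes from a compatible extension
theorem pvDfs_le (m : Int) : ∀ (cands chosen : List Int) (count best : Int),
    best ≤ m →
    (∀ S : List Int, S.Sublist cands → pvCompat chosen S = true → S ≠ [] →
        count + pvG chosen S ≤ m) →
    pvDfs cands chosen count best ≤ m := by
  intro cands
  induction cands with
  | nil => intro chosen count best hb _; simpa [pvDfs] using hb
  | cons c cands ih =>
      intro chosen count best hb hS
      by_cases h : pvOK chosen c = true
      · simp only [pvDfs, h, if_true]
        have hcnt : count + ((chosen.countP fun x => Int.gcd c x == 1 : Nat) : Int) ≤ m := by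
          have := hS [c] (by simp) (by simp [pvCompat, h]) (by simp)
          simpa [pvG] using this
        refine ih chosen count _ ?_ ?_
        · refine ih (chosen ++ [c]) _ _ (max_le hb hcnt) ?_
          intro S hsub hcomp hne
          have := hS (c :: S) (hsub.cons_cons c) (by simp [pvCompat, h, hcomp]) (by simp)
          simpa [pvG, add_assoc] using this
        · intro S hsub hcomp hne
          exact hS S (hsub.cons _) hcomp hne
      · simp only [pvDfs, h]
        refine ih chosen count best hb ?_
        intro S hsub hcomp hne
        exact hS S (hsub.cons _) hcomp hne

-- B: lower bound — every compatible extension's value is reached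
theorem pvDfs_ge_val : ∀ (cands S chosen : List Int) (count best : Int),
    S.Sublist cands → pvCompat chosen S = true → S ≠ [] →
    count + pvG chosen S ≤ pvDfs cands chosen count best := by
  intro cands
  induction cands with
  | nil =>
      intro S chosen count best hsub _ hne
      exact absurd (List.sublist_nil.1 hsub) hne
  | cons c cands ih =>
      intro S chosen count best hsub hcomp hne
      rcases List.sublist_cons_iff.1 hsub with hsub' | ⟨r, rfl, hr⟩
      · -- S avoids c
        by_cases h : pvOK chosen c = true
        · simp only [pvDfs, h, if_true]
          exact ih S chosen count _ hsub' hcomp hne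
        · simp only [pvDfs, h]
          exact ih S chosen count best hsub' hcomp hne
      · -- S = c :: r
        have h : pvOK chosen c = true := by
          have := hcomp; simp [pvCompat] at this; exact this.1
        have hcomp' : pvCompat (chosen ++ [c]) r = true := by
          have := hcomp; simp [pvCompat] at this; exact this.2
        simp only [pvDfs, h, if_true]
        set cnt := count + ((chosen.countP fun x => Int.gcd c x == 1 : Nat) : Int) with hcntdef
        have hg : count + pvG chosen (c :: r) = cnt + pvG (chosen ++ [c]) r := by
          simp [pvG, hcntdef, add_assoc]
        rcases eq_or_ne r [] with rfl | hrne
        · have h1 : count + pvG chosen [c] ≤ max best cnt := by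
            simp [pvG, hcntdef]
          exact le_trans (le_trans h1 (pvDfs_ge_best _ _ _ _)) (pvDfs_ge_best _ _ _ _)
        · have h2 := ih r (chosen ++ [c]) cnt (max best cnt) hr hcomp' hrne
          rw [hg]
          exact le_trans h2 (pvDfs_ge_best _ _ _ _)

-- arithmetic bridge: x % c = x for 0 < x < c
theorem pv_mod_small (x c : Int) (hx : 0 < x) (hxc : x < c) : PySem.Int.mod x c = x := by
  rw [PySem.Int.mod_eq_emod_of_pos (by omega)]
  exact Int.emod_eq_of_lt (by omega) hxc

theorem pvOK_iff (chosen : List Int) (c : Int) (h : ∀ x ∈ chosen, 0 < x ∧ x < c) :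
    pvOK chosen c = true ↔ ∀ x ∈ chosen, ¬ x ∣ c := by
  unfold pvOK
  rw [List.all_eq_true]
  constructor
  · intro hall x hx
    have := hall x hx
    simp only [Bool.and_eq_true, Bool.not_eq_true', beq_eq_false_iff_ne] at this
    rw [← PySem.Int.mod_eq_zero_iff_dvd]
    exact this.1
  · intro hdvd x hx
    have hmod : PySem.Int.mod c x ≠ 0 := by
      rw [Ne, PySem.Int.mod_eq_zero_iff_dvd]; exact hdvd x hx
    have hx0 := (h x hx).1
    have hmod2 : PySem.Int.mod x c ≠ 0 := by
      rw [pv_mod_small x c hx0 (h x hx).2]; omega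
    simp only [Bool.and_eq_true, Bool.not_eq_true', beq_eq_false_iff_ne]
    exact ⟨hmod, hmod2⟩

theorem pvPrimCheck_iff : ∀ L : List Int, pvPrimCheck L = true ↔ L.Pairwise (fun a b => ¬ a ∣ b) := by
  intro L
  induction L with
  | nil => simp [pvPrimCheck]
  | cons x rest ih =>
      simp only [pvPrimCheck, Bool.and_eq_true, List.all_eq_true, List.pairwise_cons, ih]
      constructor
      · rintro ⟨h1, h2⟩
        refine ⟨fun y hy => ?_, h2⟩
        have := h1 y hy
        simp only [Bool.not_eq_true', beq_eq_false_iff_ne] at this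
        rw [← PySem.Int.mod_eq_zero_iff_dvd]; exact this
      · rintro ⟨h1, h2⟩
        refine ⟨fun y hy => ?_, h2⟩
        simp only [Bool.not_eq_true', beq_eq_false_iff_ne, Ne]
        rw [PySem.Int.mod_eq_zero_iff_dvd]; exact h1 y hy

theorem pvCompat_iff : ∀ (S chosen : List Int),
    (∀ x ∈ chosen, 0 < x) → (∀ c ∈ S, 0 < c) →
    (∀ x ∈ chosen, ∀ c ∈ S, x < c) → S.Pairwise (· < ·) →
    (pvCompat chosen S = true ↔
      ((∀ x ∈ chosen, ∀ c ∈ S, ¬ x ∣ c) ∧ S.Pairwise (fun a b => ¬ a ∣ b))) := by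
  intro S
  induction S with
  | nil => intro chosen _ _ _ _; simp [pvCompat]
  | cons hd tl ih =>
      intro chosen hpos hposS hlt hpw
      have hokiff := pvOK_iff chosen hd
        (fun x hx => ⟨hpos x hx, hlt x hx hd (by simp)⟩)
      have hih := ih (chosen ++ [hd])
        (by intro x hx; rcases List.mem_append.1 hx with hx | hx
            · exact hpos x hx
            · simp at hx; rw [hx]; exact hposS hd (by simp))
        (fun d hd2 => hposS d (by simp [hd2]))
        (by intro x hx d hd2
            rcases List.mem_append.1 hx with hx | hx
            · exact hlt x hx d (by simp [hd2])
            · simp at hx; rw [hx]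
              exact (List.pairwise_cons.1 hpw).1 d hd2)
        (List.pairwise_cons.1 hpw).2
      simp only [pvCompat, Bool.and_eq_true, hokiff, hih, List.pairwise_cons]
      constructor
      · rintro ⟨h1, h2, h3⟩
        refine ⟨?_, ?_, h3⟩
        · intro x hx d hd2
          rcases List.mem_cons.1 hd2 with rfl | hd2
          · exact h1 x hx
          · exact h2 x (List.mem_append.2 (Or.inl hx)) d hd2
        · intro d hd2
          exact h2 hd (List.mem_append.2 (Or.inr (by simp))) d hd2
      · rintro ⟨h1, h2, h3⟩
        refine ⟨fun x hx => h1 x hx hd (by simp), ?_, h3⟩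
        intro x hx d hd2
        rcases List.mem_append.1 hx with hx | hx
        · exact h1 x hx d (by simp [hd2])
        · simp at hx; rw [hx]; exact h2 d hd2

theorem pvCp_snoc : ∀ (L : List Int) (c : Int),
    pvCp (L ++ [c]) = pvCp L + ((L.countP fun y => Int.gcd y c == 1 : Nat) : Int) := by
  intro L c
  induction L with
  | nil => simp [pvCp]
  | cons x L ih =>
      simp only [List.cons_append, pvCp, ih, List.countP_append, List.countP_cons]
      simp only [List.countP_nil]
      push_cast
      ring

theorem pvG_eq_cp : ∀ (S chosen : List Int), pvCp (chosen ++ S) = pvCp chosen + pvG chosen S := by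
  intro S
  induction S with
  | nil => intro chosen; simp [pvG]
  | cons c S ih =>
      intro chosen
      have h1 : chosen ++ c :: S = (chosen ++ [c]) ++ S := by simp
      rw [h1, ih (chosen ++ [c]), pvCp_snoc]
      have hc : (chosen.countP fun y => Int.gcd y c == 1) = chosen.countP fun x => Int.gcd c x == 1 :=
        List.countP_congr (fun a _ => by rw [Int.gcd_comm])
      simp only [pvG, hc]
      ring

theorem pv_mem_combos : ∀ (l : List Int) (k : Nat) (S : List Int),
    S ∈ pvCombos l k ↔ S.Sublist l ∧ S.length = k := by
  intro l
  induction l with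
  | nil =>
      intro k S
      cases k with
      | zero => simp [pvCombos, List.sublist_nil, List.length_eq_zero_iff]
      | succ k =>
          simp only [pvCombos, List.not_mem_nil, false_iff, not_and]
          intro hsub
          rw [List.sublist_nil.1 hsub]
          simp
  | cons x xs ih =>
      intro k S
      cases k with
      | zero =>
          simp only [pvCombos, List.mem_singleton]
          constructor
          · rintro rfl; exact ⟨List.nil_sublist _, rfl⟩
          · rintro ⟨_, hlen⟩; exact List.length_eq_zero_iff.1 hlen
      | succ k =>
          simp only [pvCombos, List.mem_append, List.mem_map, ih]
          constructor
          · rintro (⟨t, ⟨hsub, hlen⟩, rfl⟩ | ⟨hsub, hlen⟩)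
            · exact ⟨hsub.cons_cons x, by simp [hlen]⟩
            · exact ⟨hsub.cons x, hlen⟩
          · rintro ⟨hsub, hlen⟩
            rcases List.sublist_cons_iff.1 hsub with hsub' | ⟨r, rfl, hr⟩
            · exact Or.inr ⟨hsub', hlen⟩
            · exact Or.inl ⟨r, ⟨hr, by simpa using hlen⟩, rfl⟩

-- facts about any sublist S of range(1, n+1), and the compat/primitivity bridge
theorem pv_sublist_facts (n : Int) (S : List Int)
    (hsub : S.Sublist (PySem.List.pyRange 1 (n + 1) 1)) :
    (PySem.List.sorted S (fun x => x) false = S) ∧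
    (pvCompat [] S = true ↔ pvPrimCheck S = true) := by
  have hpos : ∀ c ∈ S, 0 < c := by
    intro c hc
    have := (PySem.List.mem_pyRange_one.1 (hsub.subset hc)).1
    omega
  have hpw : S.Pairwise (· < ·) :=
    (PySem.List.pairwise_lt_pyRange_one 1 (n + 1)).sublist hsub
  constructor
  · exact PySem.List.sorted_eq_self_of_pairwise S (fun x => x) (hpw.imp (fun h => le_of_lt h))
  · rw [pvCompat_iff S [] (by simp) hpos (by simp) hpw, pvPrimCheck_iff]
    simp

theorem pvG_nil (S : List Int) : pvG [] S = pvCp S := by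
  have := pvG_eq_cp S []
  simp only [List.nil_append, pvCp] at this
  omega

theorem pv_inner_mono (n : Int) : ∀ (b : Int) (size : Int),
    b ≤ (pvCombos (PySem.List.pyRange 1 (n + 1) 1) size.toNat).foldl
      (fun best combo =>
        if pvPrimCheck (PySem.List.sorted combo (fun x => x) false) then
          max best (pvCp combo)
        else best) b := by
  intro b size
  apply pv_le_foldl
  intro b' combo
  by_cases h : pvPrimCheck (PySem.List.sorted combo (fun x => x) false) = true
  · rw [if_pos h]; exact le_max_left _ _
  · rw [if_neg h]

theorem pv_zero_le_A (n : Int) : 0 ≤ all_primitive_coprime_max_py n := by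
  unfold all_primitive_coprime_max_py
  apply pv_le_foldl
  intro b size
  exact pv_inner_mono n b size

theorem pv_A_le_B (n : Int) :
    all_primitive_coprime_max_py n ≤ all_primitive_coprime_max_py_alt n := by
  have hB0 : (0 : Int) ≤ all_primitive_coprime_max_py_alt n := by
    have := pvDfs_ge_best (PySem.List.pyRange 1 (n + 1) 1) [] 0 (max 0 0)
    simpa [all_primitive_coprime_max_py_alt] using this
  unfold all_primitive_coprime_max_py
  apply pv_foldl_le _ _ _ ?_ _ hB0
  intro b size hb _
  apply pv_foldl_le _ _ _ ?_ _ hb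
  intro b' combo hb' hcombo
  by_cases hprim : pvPrimCheck (PySem.List.sorted combo (fun x => x) false) = true
  · rw [if_pos hprim]
    refine max_le hb' ?_
    obtain ⟨hsub, -⟩ := (pv_mem_combos _ _ combo).1 hcombo
    obtain ⟨hsorted, hbridge⟩ := pv_sublist_facts n combo hsub
    rw [hsorted] at hprim
    rcases eq_or_ne combo [] with rfl | hne
    · simpa [pvCp] using hB0
    · have hcomp : pvCompat [] combo = true := hbridge.2 hprim
      have := pvDfs_ge_val (PySem.List.pyRange 1 (n + 1) 1) combo [] 0 (max 0 0)
        hsub hcomp hne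
      rw [pvG_nil, zero_add] at this
      simpa [all_primitive_coprime_max_py_alt] using this
  · rw [if_neg hprim]; exact hb'

theorem pv_B_le_A (n : Int) :
    all_primitive_coprime_max_py_alt n ≤ all_primitive_coprime_max_py n := by
  unfold all_primitive_coprime_max_py_alt
  apply pvDfs_le
  · simpa using pv_zero_le_A n
  · intro S hsub hcomp hne
    rw [pvG_nil, zero_add]
    obtain ⟨hsorted, hbridge⟩ := pv_sublist_facts n S hsub
    have hprim : pvPrimCheck S = true := hbridge.1 hcomp
    by_cases hlen2 : 2 ≤ S.length
    · have hlenle : S.length ≤ (PySem.List.pyRange 1 (n + 1) 1).length := hsub.length_le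
      rw [PySem.List.length_pyRange_one] at hlenle
      have hmemsize : ((S.length : Int)) ∈ PySem.List.pyRange 2 (n + 1) 1 := by
        rw [PySem.List.mem_pyRange_one]
        omega
      unfold all_primitive_coprime_max_py
      refine pv_val_le_foldl _ (pv_inner_mono n) hmemsize (pvCp S) ?_ 0
      intro b
      have hmem : S ∈ pvCombos (PySem.List.pyRange 1 (n + 1) 1) ((S.length : Int)).toNat :=
        (pv_mem_combos _ _ S).2 ⟨hsub, by simp⟩
      refine pv_val_le_foldl _ ?_ hmem (pvCp S) ?_ b
      · intro b' combo
        by_cases h : pvPrimCheck (PySem.List.sorted combo (fun x => x) false) = true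
        · rw [if_pos h]; exact le_max_left _ _
        · rw [if_neg h]
      · intro b'
        rw [hsorted, if_pos hprim]
        exact le_max_right _ _
    · match S, hne, hlen2 with
      | [c], _, _ => simpa [pvCp] using pv_zero_le_A n
      | c :: d :: t, _, h2 => exact absurd (by simp) h2

-- ===== VERDICT (by name: the statement is the Claim_ definition above) =====
theorem all_primitive_coprime_max_py_spec : Claim_equal_all_primitive_coprime_max_py := by
  intro n _
  unfold Spec_all_primitive_coprime_max_py
  exact le_antisymm (pv_A_le_B n) (pv_B_le_A n)
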